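-- pv_equiv track=rewrite | github.com/remyzakarian/ED-TP-fonctionnel-et-r-cursivit- | n1.py | rendreUneSolution
-- ===== SOURCE A (Python) =====
-- def rendreUneSolution(somme,systemepieces):
--     if(systemepieces[0] == systemepieces[-1]):
--         return {systemepieces[-1]:somme} #nous n'avons plus que 1 donc la réponse est somme pièce de 1 {1:somme}
--     else:
--         pg=systemepieces[0] #La plus grande piece de l'ensenble
--         q=somme//pg # Le nombre possible de rendu pour la piece pg par exemple 353 avec 100 donne 3
--         r=somme%pg # ce qui reste a rendre avec les autres pièces exemple 353 (si 3*100 reste 53)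
--         return {pg:q,**rendreUneSolution(r,systemepieces[1:])} #renvoyer q pièce et continuer le rendu avec le reste sans la première pièce
-- ===== SOURCE B (Python) =====
-- def rendreUneSolution(somme, systemepieces):
--     # single left-to-right pass with an index over the coin list (no slicing, no recursion)
--     res = {}
--     last = systemepieces[-1]
--     for p in systemepieces:
--         if p == last:
--             res[p] = somme
--             break
--         res[p] = somme // p
--         somme %= p
--     return res
-- ===== Notes on version B (the rewrite author's own statement) =====
-- stated objective: faster
-- what changed: Replaces the recursion that slices the coin list at every step (and merges dicts via {pg:q, **rec}) with a single iterative left-to-right pass that keeps a running remainder and fills one dict in place.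
import Mathlib
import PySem

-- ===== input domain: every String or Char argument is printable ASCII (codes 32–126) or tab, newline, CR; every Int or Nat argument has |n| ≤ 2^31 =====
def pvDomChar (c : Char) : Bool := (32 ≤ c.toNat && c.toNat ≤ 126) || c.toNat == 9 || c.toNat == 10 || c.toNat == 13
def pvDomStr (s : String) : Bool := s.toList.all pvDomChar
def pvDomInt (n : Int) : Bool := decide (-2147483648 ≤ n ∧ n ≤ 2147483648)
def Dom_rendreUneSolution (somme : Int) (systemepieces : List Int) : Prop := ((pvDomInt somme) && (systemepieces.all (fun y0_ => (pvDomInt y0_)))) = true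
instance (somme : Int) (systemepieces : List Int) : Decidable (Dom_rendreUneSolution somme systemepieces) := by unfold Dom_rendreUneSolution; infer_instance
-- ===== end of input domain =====

-- B replaces A's slicing recursion by a single iterative pass with a running remainder.

-- ===== PORT A =====
-- A, literally: base case when the first coin equals the last one; otherwise divide, take the
-- remainder and recurse on the tail slice, merging {pg:q, **rec} (insert pg:q, then each item of rec).
def rendreAux (somme : Int) (systemepieces : List Int) : PySem.Dict Int Int :=
  match systemepieces with
  | [] => PySem.Dict.empty   -- Python raises IndexError on systemepieces[0]; excluded by Pre_
  | p :: rest =>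
    let last := (p :: rest).getLast!   -- systemepieces[-1]
    if p = last then
      PySem.Dict.empty.insert last somme
    else
      let q := PySem.Int.floordiv somme p
      let r := PySem.Int.mod somme p
      let recd := rendreAux r rest
      recd.items.foldl (fun d kv => d.insert kv.1 kv.2) (PySem.Dict.empty.insert p q)

def rendreUneSolution (somme : Int) (systemepieces : List Int) : List (Int × Int) :=
  (rendreAux somme systemepieces).items

-- ===== PORT B =====
-- B, literally: the for-loop over the coins with the running remainder `somme`,
-- breaking when the coin equals the last one.
def altLoop (last : Int) (sp : List Int) (somme : Int) (res : PySem.Dict Int Int) : PySem.Dict Int Int :=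
  match sp with
  | [] => res
  | p :: rest =>
    if p = last then res.insert p somme
    else altLoop last rest (PySem.Int.mod somme p) (res.insert p (PySem.Int.floordiv somme p))

def rendreUneSolution_alt (somme : Int) (systemepieces : List Int) : List (Int × Int) :=
  match systemepieces with
  | [] => []   -- Python raises IndexError on systemepieces[-1]; excluded by Pre_
  | p :: rest => (altLoop (p :: rest).getLast! (p :: rest) somme PySem.Dict.empty).items

-- ===== PRECONDITION & SPEC =====
-- Pre_ excludes exactly the inputs where the Python A raises: the empty list (IndexError) and
-- lists with a 0 coin strictly before the first coin equal to the last one (ZeroDivisionError).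
def Pre_rendreUneSolution (somme : Int) (systemepieces : List Int) : Prop :=
  systemepieces ≠ [] ∧ (0 : Int) ∉ systemepieces.takeWhile (fun x => x != systemepieces.getLast!)
instance (somme : Int) (systemepieces : List Int) : Decidable (Pre_rendreUneSolution somme systemepieces) := by unfold Pre_rendreUneSolution; infer_instance

def pvWitness_rendreUneSolution : Int × List Int := (353, [100, 10, 1])

def Spec_rendreUneSolution (somme : Int) (systemepieces : List Int) (out : List (Int × Int)) : Prop := out = rendreUneSolution_alt somme systemepieces
instance (somme : Int) (systemepieces : List Int) (out : List (Int × Int)) : Decidable (Spec_rendreUneSolution somme systemepieces out) := by unfold Spec_rendreUneSolution; infer_instance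

-- ===== CLAIM (what is proved, stated in full; the proofs are below) =====
def Claim_equal_rendreUneSolution : Prop := ∀ (somme : Int) (systemepieces : List Int), Dom_rendreUneSolution somme systemepieces → Pre_rendreUneSolution somme systemepieces → Spec_rendreUneSolution somme systemepieces (rendreUneSolution somme systemepieces)

-- ===== LEMMAS AND PROOFS =====

-- merging a list of pairs into a dict, Python-insert by Python-insert
def dmerge (l : List (Int × Int)) (d : PySem.Dict Int Int) : PySem.Dict Int Int :=
  l.foldl (fun d kv => d.insert kv.1 kv.2) d

-- the common greedy trace: (coin, quotient) pairs down to the first coin equal to `last`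
def entriesOf (last somme : Int) (sp : List Int) : List (Int × Int) :=
  match sp with
  | [] => []
  | p :: rest =>
    if p = last then [(p, somme)]
    else (p, PySem.Int.floordiv somme p) :: entriesOf last (PySem.Int.mod somme p) rest

theorem dmerge_cons (k v : Int) (t : List (Int × Int)) (d : PySem.Dict Int Int) :
    dmerge ((k, v) :: t) d = dmerge t (d.insert k v) := rfl

theorem dmerge_append (l₁ l₂ : List (Int × Int)) (d : PySem.Dict Int Int) :
    dmerge (l₁ ++ l₂) d = dmerge l₂ (dmerge l₁ d) := List.foldl_append

-- an in-place overwrite at k commutes with an insert at a ≠ k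
theorem insert_comm_of_contains (r : PySem.Dict Int Int) (k v a b : Int)
    (hak : a ≠ k) (hk : r.contains k = true) :
    (r.insert k v).insert a b = (r.insert a b).insert k v := by
  apply PySem.Dict.ext
  by_cases ha : r.contains a = true
  · rw [PySem.Dict.items_insert_of_contains _ _ (by simp [PySem.Dict.contains_insert, ha]),
        PySem.Dict.items_insert_of_contains _ _ hk,
        PySem.Dict.items_insert_of_contains _ _ (by simp [PySem.Dict.contains_insert, hk]),
        PySem.Dict.items_insert_of_contains _ _ ha,
        List.map_map, List.map_map]
    apply List.map_congr_left
    intro p _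
    by_cases h1 : p.1 = k <;> by_cases h2 : p.1 = a <;>
      simp_all [Function.comp]
  · rw [PySem.Dict.items_insert_of_not_contains _ _ (by simp [PySem.Dict.contains_insert, ha, hak] : ((r.insert k v).contains a) = false),
        PySem.Dict.items_insert_of_contains _ _ hk,
        PySem.Dict.items_insert_of_contains _ _ (by simp [PySem.Dict.contains_insert, hk]),
        PySem.Dict.items_insert_of_not_contains _ _ (by simp [ha] : r.contains a = false),
        List.map_append]
    simp [hak]

-- merging pairs whose keys avoid k commutes with an in-place overwrite at k
theorem dmerge_insert_of_not_mem_keys (t : List (Int × Int)) :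
    ∀ (r : PySem.Dict Int Int) (k v : Int), k ∉ t.map Prod.fst → r.contains k = true →
    dmerge t (r.insert k v) = (dmerge t r).insert k v := by
  induction t with
  | nil => intro r k v _ _; rfl
  | cons ab t ih =>
    intro r k v hmem hk
    obtain ⟨a, b⟩ := ab
    have hak : a ≠ k := by simp at hmem; exact fun h => hmem.1 h.symm
    rw [dmerge_cons, dmerge_cons, insert_comm_of_contains r k v a b hak hk,
        ih (r.insert a b) k v (by simp at hmem ⊢; exact hmem.2)
          (by simp [PySem.Dict.contains_insert, hk])]

theorem dmerge_map_replace (k v : Int) (l : List (Int × Int)) :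
    ∀ d : PySem.Dict Int Int, (l.map Prod.fst).Nodup → k ∈ l.map Prod.fst →
    dmerge (l.map (fun p => if p.1 == k then (k, v) else p)) d = (dmerge l d).insert k v := by
  induction l with
  | nil => simp
  | cons ab t ih =>
    intro d hnd hmem
    obtain ⟨a, b⟩ := ab
    simp only [List.map_cons] at hnd ⊢
    by_cases hak : a = k
    · subst hak
      have hkt : a ∉ t.map Prod.fst := (List.nodup_cons.mp hnd).1
      have ht : t.map (fun p => if p.1 == a then (a, v) else p) = t := by
        have h2 : t.map (fun p => if p.1 == a then (a, v) else p) = t.map id := by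
          apply List.map_congr_left
          intro p hp
          have : p.1 ≠ a := fun h => hkt (h ▸ List.mem_map_of_mem hp)
          simp [this]
        simpa using h2
      simp only [BEq.rfl, if_pos]
      rw [ht, dmerge_cons, dmerge_cons,
          ← PySem.Dict.insert_insert_self d a b v,
          dmerge_insert_of_not_mem_keys t (d.insert a b) a v hkt
            (by simp)]
    · have : ((a, b).1 == k) = false := by simp [hak]
      simp only [this, Bool.false_eq_true, if_false]
      rw [dmerge_cons, dmerge_cons]
      apply ih
      · exact hnd.of_cons
      · simp at hmem
        rcases hmem with h | h
        · exact absurd h.symm hak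
        · obtain ⟨x, hx⟩ := h
          exact List.mem_map.mpr ⟨(k, x), hx, rfl⟩

theorem dmerge_items_insert (D : PySem.Dict Int Int) (k v : Int) (d : PySem.Dict Int Int)
    (hnd : D.keys.Nodup) :
    dmerge (D.insert k v).items d = (dmerge D.items d).insert k v := by
  by_cases hc : D.contains k = true
  · rw [PySem.Dict.items_insert_of_contains _ _ hc]
    apply dmerge_map_replace
    · simpa [PySem.Dict.keys] using hnd
    · have := (PySem.Dict.contains_iff_mem_keys D k).mp hc
      simpa [PySem.Dict.keys] using this
  · rw [PySem.Dict.items_insert_of_not_contains _ _ (by simpa using hc),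
        dmerge_append]
    rfl

theorem nodup_keys_dmerge (l : List (Int × Int)) (d : PySem.Dict Int Int) (h : d.keys.Nodup) :
    (dmerge l d).keys.Nodup :=
  PySem.Dict.nodup_keys_foldl_insert_key l Prod.fst (fun _ kv => kv.2) d h

-- re-merging a dict that was itself built by merging into the empty dict is merging the pairs
theorem dmerge_dmerge (l : List (Int × Int)) :
    ∀ d : PySem.Dict Int Int, dmerge (dmerge l PySem.Dict.empty).items d = dmerge l d := by
  induction l using List.reverseRecOn with
  | nil => intro d; rfl
  | append_singleton t kv ih =>
    intro d
    obtain ⟨k, v⟩ := kv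
    rw [dmerge_append, dmerge_append]
    show dmerge ((dmerge t PySem.Dict.empty).insert k v).items d = (dmerge t d).insert k v
    rw [dmerge_items_insert _ _ _ _ (nodup_keys_dmerge t _ PySem.Dict.nodup_keys_empty), ih d]

theorem getLast!_cons_of_ne_nil (p : Int) (rest : List Int) (h : rest ≠ []) :
    (p :: rest).getLast! = rest.getLast! := by
  cases rest with
  | nil => exact absurd rfl h
  | cons a t => rfl

theorem rendreAux_eq_entries (sp : List Int) :
    ∀ (somme : Int), sp ≠ [] →
    rendreAux somme sp = dmerge (entriesOf sp.getLast! somme sp) PySem.Dict.empty := by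
  induction sp with
  | nil => intro _ h; exact absurd rfl h
  | cons p rest ih =>
    intro somme _
    by_cases hp : p = (p :: rest).getLast!
    · rw [rendreAux, entriesOf, if_pos hp, if_pos hp, ← hp]; rfl
    · have hrest : rest ≠ [] := by
        intro hnil; subst hnil
        exact hp rfl
      have hlast : (p :: rest).getLast! = rest.getLast! := getLast!_cons_of_ne_nil p rest hrest
      rw [rendreAux, entriesOf, if_neg hp, if_neg hp]
      show dmerge (rendreAux (PySem.Int.mod somme p) rest).items
          (PySem.Dict.empty.insert p (PySem.Int.floordiv somme p)) = _
      rw [ih (PySem.Int.mod somme p) hrest, dmerge_dmerge, hlast]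
      rfl

theorem altLoop_eq_entries (last : Int) (sp : List Int) :
    ∀ (somme : Int) (res : PySem.Dict Int Int),
    altLoop last sp somme res = dmerge (entriesOf last somme sp) res := by
  induction sp with
  | nil => intro _ _; rfl
  | cons p rest ih =>
    intro somme res
    rw [altLoop, entriesOf]
    by_cases hp : p = last
    · rw [if_pos hp, if_pos hp]; rfl
    · rw [if_neg hp, if_neg hp, ih]; rfl

-- ===== VERDICT (by name: the statement is the Claim_ definition above) =====
theorem rendreUneSolution_spec : Claim_equal_rendreUneSolution := by
  intro somme sp _ hpre
  unfold Spec_rendreUneSolution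
  match sp with
  | [] => exact absurd rfl hpre.1
  | p :: rest =>
    show (rendreAux somme (p :: rest)).items = _
    rw [rendreUneSolution_alt, rendreAux_eq_entries (p :: rest) somme (List.cons_ne_nil p rest),
      altLoop_eq_entries]
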